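-- pv_equiv track=rewrite | github.com/OriShapira/ENDow | run_inference_mrda.py | __parse_reply
-- ===== SOURCE A (Python) =====
-- def __parse_reply(reply):
--     label = ''
--     explanation = ''
--     reply_lines = reply.split('\n')
--     for reply_line in reply_lines:
--         reply_line = reply_line.lower().strip()
--         if reply_line.startswith('label:'):
--             label = reply_line[6:].strip()
--         elif reply_line.startswith('explanation:'):
--             explanation = reply_line[12:].strip()
--
--     if 'statement' in label:
--         label_to_use = 's'
--     elif 'continuer' in label:
--         label_to_use = 'b'
--     elif 'floor holder' in label:
--         label_to_use = 'fh'
--     elif 'yes-no-question' in label: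
--         label_to_use = 'qy'
--     elif 'interrupted' in label or 'abandoned' in label or 'uninterpretable' in label:
--         label_to_use = '%'
--     elif 'floor grabber' in label:
--         label_to_use = 'fg'
--     elif 'wh-question' in label or 'wh question' in label:
--         label_to_use = 'qw'
--     elif 'hold before answer' in label or 'agreement' in label:
--         label_to_use = 'h'
--     elif 'or-clause' in label or 'or clause' in label:
--         label_to_use = 'qrr'
--     elif 'rhetorical question' in label:
--         label_to_use = 'qh'
--     elif 'or question' in label:
--         label_to_use = 'qr'
--     elif 'open-ended question' in label or 'open ended question' in label:
--         label_to_use = 'qo'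
--     else:
--         label_to_use = ''
--
--     return label_to_use, explanation
-- ===== SOURCE B (Python) =====
-- # Generic key/value field parser (partition on the first ':' into a dict; last
-- # occurrence wins by overwrite), then a flat first-match keyword->code lookup.
-- _KEYWORD_CODES = [
--     ('statement', 's'),
--     ('continuer', 'b'),
--     ('floor holder', 'fh'),
--     ('yes-no-question', 'qy'),
--     ('interrupted', '%'), ('abandoned', '%'), ('uninterpretable', '%'),
--     ('floor grabber', 'fg'),
--     ('wh-question', 'qw'), ('wh question', 'qw'),
--     ('hold before answer', 'h'), ('agreement', 'h'),
--     ('or-clause', 'qrr'), ('or clause', 'qrr'),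
--     ('rhetorical question', 'qh'),
--     ('or question', 'qr'),
--     ('open-ended question', 'qo'), ('open ended question', 'qo'),
-- ]
--
-- def __parse_reply(reply):
--     fields = {}
--     for line in reply.split('\n'):
--         key, sep, val = line.lower().strip().partition(':')
--         if sep:
--             fields[key] = val.strip()
--     label = fields.get('label', '')
--     code = next((c for kw, c in _KEYWORD_CODES if kw in label), '')
--     return code, fields.get('explanation', '')
-- ===== Notes on version B (the rewrite author's own statement) =====
-- stated objective: idiomatic
-- what changed: The prefix-test-and-slice line loop is replaced by a generic key/value parser that splits every line at its first colon into a dict (last occurrence wins by overwrite) and reads the two fields out of it, and the twelve-branch if-elif chain becomes a flat keyword-to-code association list consumed by a first-match generator.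
import Mathlib
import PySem

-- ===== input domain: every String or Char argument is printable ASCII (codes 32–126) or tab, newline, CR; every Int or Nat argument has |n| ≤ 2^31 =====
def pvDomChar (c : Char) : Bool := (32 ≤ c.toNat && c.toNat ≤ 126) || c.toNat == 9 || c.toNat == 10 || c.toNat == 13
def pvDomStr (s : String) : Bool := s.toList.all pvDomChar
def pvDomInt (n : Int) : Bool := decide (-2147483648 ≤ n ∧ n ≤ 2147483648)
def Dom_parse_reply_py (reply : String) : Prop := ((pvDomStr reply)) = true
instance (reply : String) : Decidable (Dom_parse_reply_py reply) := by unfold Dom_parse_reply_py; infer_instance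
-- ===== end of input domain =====

-- B replaces the per-field prefix tests by a generic partition-on-':' key/value dict parse
-- and the twelve-branch if-elif chain by a flat first-match keyword->code association list
-- (idiomatic alternative decomposition, same cost).

-- ===== PORT A =====
-- literal transliteration of A: a forward fold overwriting (label, explanation), then the if-elif chain
def pvStepA (acc : String × String) (line : String) : String × String :=
  let l := PySem.Str.strip (PySem.Str.lower line)
  if PySem.Str.startswith l "label:" then
    (PySem.Str.strip (PySem.Str.slice l (some 6) none), acc.2)
  else if PySem.Str.startswith l "explanation:" then
    (acc.1, PySem.Str.strip (PySem.Str.slice l (some 12) none))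
  else acc

def parse_reply_py (reply : String) : String × String :=
  let lines := (PySem.Str.split? reply "\n").getD []
  let acc := lines.foldl pvStepA ("", "")
  let label := acc.1
  let explanation := acc.2
  let label_to_use :=
    if PySem.Str.isIn "statement" label then "s"
    else if PySem.Str.isIn "continuer" label then "b"
    else if PySem.Str.isIn "floor holder" label then "fh"
    else if PySem.Str.isIn "yes-no-question" label then "qy"
    else if PySem.Str.isIn "interrupted" label || PySem.Str.isIn "abandoned" label || PySem.Str.isIn "uninterpretable" label then "%"
    else if PySem.Str.isIn "floor grabber" label then "fg"
    else if PySem.Str.isIn "wh-question" label || PySem.Str.isIn "wh question" label then "qw"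
    else if PySem.Str.isIn "hold before answer" label || PySem.Str.isIn "agreement" label then "h"
    else if PySem.Str.isIn "or-clause" label || PySem.Str.isIn "or clause" label then "qrr"
    else if PySem.Str.isIn "rhetorical question" label then "qh"
    else if PySem.Str.isIn "or question" label then "qr"
    else if PySem.Str.isIn "open-ended question" label || PySem.Str.isIn "open ended question" label then "qo"
    else ""
  (label_to_use, explanation)

-- ===== PORT B =====
-- hand port of str.partition(':') (not in PySem): exact — (head, sep-found flag, tail) split at the FIRST ':'
def pvPartitionColon : List Char → List Char × Bool × List Char
  | [] => ([], false, [])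
  | c :: rest =>
    if c = ':' then ([], true, rest)
    else
      match pvPartitionColon rest with
      | (k, f, v) => (c :: k, f, v)

-- B's flat keyword -> code association list (first match wins)
def pvKeywordCodes : List (String × String) :=
  [ ("statement", "s"),
    ("continuer", "b"),
    ("floor holder", "fh"),
    ("yes-no-question", "qy"),
    ("interrupted", "%"), ("abandoned", "%"), ("uninterpretable", "%"),
    ("floor grabber", "fg"),
    ("wh-question", "qw"), ("wh question", "qw"),
    ("hold before answer", "h"), ("agreement", "h"),
    ("or-clause", "qrr"), ("or clause", "qrr"),
    ("rhetorical question", "qh"),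
    ("or question", "qr"),
    ("open-ended question", "qo"), ("open ended question", "qo") ]

-- Source B's next((c for kw, c in _KEYWORD_CODES if kw in label), '')
def pvNext : List (String × String) → String → String
  | [], _ => ""
  | (kw, c) :: rest, label => if PySem.Str.isIn kw label then c else pvNext rest label

-- Source B's loop body: partition the normalized line on ':' and store val.strip() under key
def pvStepB (d : PySem.Dict String String) (line : String) : PySem.Dict String String :=
  match pvPartitionColon (PySem.Str.strip (PySem.Str.lower line)).toList with
  | (k, true, v) => d.insert (String.ofList k) (PySem.Str.strip (String.ofList v))
  | (_, false, _) => d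

def parse_reply_py_alt (reply : String) : String × String :=
  let lines := (PySem.Str.split? reply "\n").getD []
  let fields := lines.foldl pvStepB PySem.Dict.empty
  let label := fields.getD "label" ""
  (pvNext pvKeywordCodes label, fields.getD "explanation" "")

-- ===== PRECONDITION & SPEC =====
def Spec_parse_reply_py (reply : String) (out : String × String) : Prop := out = parse_reply_py_alt reply
instance (reply : String) (out : String × String) : Decidable (Spec_parse_reply_py reply out) := by unfold Spec_parse_reply_py; infer_instance

-- ===== CLAIM (what is proved, stated in full; the proofs are below) =====
def Claim_equal_parse_reply_py : Prop := ∀ (reply : String), Dom_parse_reply_py reply → Spec_parse_reply_py reply (parse_reply_py reply)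

-- ===== LEMMAS AND PROOFS =====

def pvNorm (line : String) : String := PySem.Str.strip (PySem.Str.lower line)

def pvLabPred (l : String) : Bool := PySem.Str.startswith (pvNorm l) "label:"
def pvExpPred (l : String) : Bool :=
  !PySem.Str.startswith (pvNorm l) "label:" && PySem.Str.startswith (pvNorm l) "explanation:"

-- canonical value of the line loops: last matching line wins ⇔ first of the reversed list
def pvLabVal (lines : List String) (d : String) : String :=
  match lines.reverse.find? pvLabPred with
  | some l => PySem.Str.strip (PySem.Str.slice (pvNorm l) (some 6) none)
  | none => d

def pvExpVal (lines : List String) (d : String) : String :=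
  match lines.reverse.find? pvExpPred with
  | some l => PySem.Str.strip (PySem.Str.slice (pvNorm l) (some 12) none)
  | none => d

theorem pvLabVal_cons (x : String) (xs : List String) (d : String) :
    pvLabVal (x :: xs) d =
      pvLabVal xs (if pvLabPred x then
        PySem.Str.strip (PySem.Str.slice (pvNorm x) (some 6) none) else d) := by
  unfold pvLabVal
  rw [List.reverse_cons, List.find?_append]
  cases hf : xs.reverse.find? pvLabPred with
  | some l => simp
  | none =>
    rw [List.find?_cons]
    cases hx : pvLabPred x <;> simp_all

theorem pvExpVal_cons (x : String) (xs : List String) (d : String) :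
    pvExpVal (x :: xs) d =
      pvExpVal xs (if pvExpPred x then
        PySem.Str.strip (PySem.Str.slice (pvNorm x) (some 12) none) else d) := by
  unfold pvExpVal
  rw [List.reverse_cons, List.find?_append]
  cases hf : xs.reverse.find? pvExpPred with
  | some l => simp
  | none =>
    rw [List.find?_cons]
    cases hx : pvExpPred x <;> simp_all

theorem pvFoldA_eq (lines : List String) :
    ∀ lab exp, lines.foldl pvStepA (lab, exp) = (pvLabVal lines lab, pvExpVal lines exp) := by
  induction lines with
  | nil => intro lab exp; simp [pvLabVal, pvExpVal]
  | cons x xs ih =>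
    intro lab exp
    have hx : pvStepA (lab, exp) x =
        (if pvLabPred x then PySem.Str.strip (PySem.Str.slice (pvNorm x) (some 6) none) else lab,
         if pvExpPred x then PySem.Str.strip (PySem.Str.slice (pvNorm x) (some 12) none) else exp) := by
      simp only [pvStepA, pvLabPred, pvExpPred, pvNorm]
      split_ifs with h1 h2 <;> simp_all
    rw [List.foldl_cons, hx, ih, pvLabVal_cons, pvExpVal_cons]

-- partition really splits at the first ':'
theorem pvPartition_found (cs k v : List Char)
    (h : pvPartitionColon cs = (k, true, v)) : cs = k ++ ':' :: v := by
  induction cs generalizing k v with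
  | nil => simp [pvPartitionColon] at h
  | cons c rest ih =>
    by_cases hc : c = ':'
    · have hstep : pvPartitionColon (c :: rest) = ([], true, rest) := by
        simp [pvPartitionColon, hc]
      rw [hstep] at h
      simp only [Prod.mk.injEq] at h
      obtain ⟨rfl, -, rfl⟩ := h
      simp [hc]
    · cases hrec : pvPartitionColon rest with
      | mk k' fv =>
        cases fv with
        | mk f' v' =>
          have hstep : pvPartitionColon (c :: rest) = (c :: k', f', v') := by
            simp [pvPartitionColon, hc, hrec]
          rw [hstep] at h
          simp only [Prod.mk.injEq] at h
          obtain ⟨rfl, hf, rfl⟩ := h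
          subst hf
          have := ih k' v' hrec
          simp [this]

-- if the normalized line starts with "label:" the partition is exactly ("label", drop 6)
theorem pvPartition_label (cs : List Char)
    (h : PySem.Chars.startswith cs "label:".toList = true) :
    pvPartitionColon cs = ("label".toList, true, cs.drop 6) := by
  rw [PySem.Chars.startswith_iff] at h
  obtain ⟨t, ht⟩ := h
  subst ht
  rfl

theorem pvPartition_expl (cs : List Char)
    (h : PySem.Chars.startswith cs "explanation:".toList = true) :
    pvPartitionColon cs = ("explanation".toList, true, cs.drop 12) := by
  rw [PySem.Chars.startswith_iff] at h
  obtain ⟨t, ht⟩ := h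
  subst ht
  rfl

-- conversely, a partition key "label"/"explanation" forces the prefix
theorem pvKey_label (cs k v : List Char) (h : pvPartitionColon cs = (k, true, v))
    (hk : String.ofList k = "label") : PySem.Chars.startswith cs "label:".toList = true := by
  have hcs := pvPartition_found cs k v h
  have hkl : k = "label".toList := by
    have := congrArg String.toList hk
    rw [String.toList_ofList] at this
    simpa using this
  rw [PySem.Chars.startswith_iff]
  exact ⟨v, by rw [hcs, hkl]; rfl⟩

theorem pvKey_expl (cs k v : List Char) (h : pvPartitionColon cs = (k, true, v))
    (hk : String.ofList k = "explanation") : PySem.Chars.startswith cs "explanation:".toList = true := by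
  have hcs := pvPartition_found cs k v h
  have hkl : k = "explanation".toList := by
    have := congrArg String.toList hk
    rw [String.toList_ofList] at this
    simpa using this
  rw [PySem.Chars.startswith_iff]
  exact ⟨v, by rw [hcs, hkl]; rfl⟩

-- a second disjointness direction: an "explanation:" line does not start with "label:"
theorem pvStarts_disjoint' (s : String) (h1 : PySem.Str.startswith s "explanation:" = true) :
    PySem.Str.startswith s "label:" = false := by
  rw [PySem.Str.startswith_eq] at *
  rw [Bool.eq_false_iff]
  intro h2
  rw [PySem.Chars.startswith_iff] at h1 h2
  rcases h1 with ⟨t1, e1⟩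
  rcases h2 with ⟨t2, e2⟩
  rw [← e1] at e2
  simp at e2

-- slicing l[n:] (0 ≤ n) is dropping n characters
theorem pvSlice_eq_drop (l : String) (n : Int) (hn : 0 ≤ n) :
    PySem.Str.slice l (some n) none = String.ofList (l.toList.drop n.toNat) := by
  have h : (PySem.Str.slice l (some n) none).toList = l.toList.drop n.toNat := by
    simp [PySem.List.slice_from _ hn]
  calc PySem.Str.slice l (some n) none
      = String.ofList (PySem.Str.slice l (some n) none).toList := String.ofList_toList.symm
    _ = String.ofList (l.toList.drop n.toNat) := by rw [h]

-- the two per-line step lemmas for B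
theorem pvStepB_label (d : PySem.Dict String String) (x : String) :
    (pvStepB d x).getD "label" "" =
      if pvLabPred x then PySem.Str.strip (PySem.Str.slice (pvNorm x) (some 6) none)
      else d.getD "label" "" := by
  by_cases h1 : PySem.Str.startswith (pvNorm x) "label:" = true
  · have hb : PySem.Chars.startswith (pvNorm x).toList "label:".toList = true := by
      rw [← PySem.Str.startswith_eq]; exact h1
    have hp := pvPartition_label _ hb
    have hstep : pvStepB d x =
        d.insert (String.ofList "label".toList)
          (PySem.Str.strip (String.ofList ((pvNorm x).toList.drop 6))) := by
      simp only [pvStepB]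
      rw [show PySem.Str.strip (PySem.Str.lower x) = pvNorm x from rfl, hp]
    have hpred : pvLabPred x = true := h1
    rw [hstep, String.ofList_toList, PySem.Dict.getD_insert_self, hpred,
      pvSlice_eq_drop (pvNorm x) 6 (by norm_num)]
    simp
  · have h1' : pvLabPred x = false := by simpa [pvLabPred] using h1
    cases hp : pvPartitionColon (pvNorm x).toList with
    | mk k fv =>
      cases fv with
      | mk f v =>
        cases f with
        | false =>
          have hstep : pvStepB d x = d := by
            simp only [pvStepB]
            rw [show PySem.Str.strip (PySem.Str.lower x) = pvNorm x from rfl, hp]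
          rw [hstep, h1']
          simp
        | true =>
          have hk : String.ofList k ≠ "label" := by
            intro hke
            have := pvKey_label _ _ _ hp hke
            rw [← PySem.Str.startswith_eq] at this
            exact h1 this
          have hstep : pvStepB d x =
              d.insert (String.ofList k) (PySem.Str.strip (String.ofList v)) := by
            simp only [pvStepB]
            rw [show PySem.Str.strip (PySem.Str.lower x) = pvNorm x from rfl, hp]
          rw [hstep, PySem.Dict.getD_insert_of_ne (hne := Ne.symm hk), h1']
          simp

theorem pvStepB_expl (d : PySem.Dict String String) (x : String) :
    (pvStepB d x).getD "explanation" "" =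
      if pvExpPred x then PySem.Str.strip (PySem.Str.slice (pvNorm x) (some 12) none)
      else d.getD "explanation" "" := by
  by_cases h2 : PySem.Str.startswith (pvNorm x) "explanation:" = true
  · have hb : PySem.Chars.startswith (pvNorm x).toList "explanation:".toList = true := by
      rw [← PySem.Str.startswith_eq]; exact h2
    have hp := pvPartition_expl _ hb
    have hstep : pvStepB d x =
        d.insert (String.ofList "explanation".toList)
          (PySem.Str.strip (String.ofList ((pvNorm x).toList.drop 12))) := by
      simp only [pvStepB]
      rw [show PySem.Str.strip (PySem.Str.lower x) = pvNorm x from rfl, hp]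
    have hpred : pvExpPred x = true := by
      unfold pvExpPred
      rw [pvStarts_disjoint' _ h2, h2]
      rfl
    rw [hstep, String.ofList_toList, PySem.Dict.getD_insert_self, hpred,
      pvSlice_eq_drop (pvNorm x) 12 (by norm_num)]
    simp
  · have hpred : pvExpPred x = false := by
      unfold pvExpPred
      rw [show PySem.Str.startswith (pvNorm x) "explanation:" = false from by
        simpa using h2]
      simp
    cases hp : pvPartitionColon (pvNorm x).toList with
    | mk k fv =>
      cases fv with
      | mk f v =>
        cases f with
        | false =>
          have hstep : pvStepB d x = d := by
            simp only [pvStepB]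
            rw [show PySem.Str.strip (PySem.Str.lower x) = pvNorm x from rfl, hp]
          rw [hstep, hpred]
          simp
        | true =>
          have hk : String.ofList k ≠ "explanation" := by
            intro hke
            have := pvKey_expl _ _ _ hp hke
            rw [← PySem.Str.startswith_eq] at this
            exact h2 this
          have hstep : pvStepB d x =
              d.insert (String.ofList k) (PySem.Str.strip (String.ofList v)) := by
            simp only [pvStepB]
            rw [show PySem.Str.strip (PySem.Str.lower x) = pvNorm x from rfl, hp]
          rw [hstep, PySem.Dict.getD_insert_of_ne (hne := Ne.symm hk), hpred]
          simp

theorem pvFoldB_label (lines : List String) :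
    ∀ d : PySem.Dict String String,
      (lines.foldl pvStepB d).getD "label" "" = pvLabVal lines (d.getD "label" "") := by
  induction lines with
  | nil => intro d; simp [pvLabVal]
  | cons x xs ih =>
    intro d
    rw [List.foldl_cons, ih, pvStepB_label, pvLabVal_cons]

theorem pvFoldB_expl (lines : List String) :
    ∀ d : PySem.Dict String String,
      (lines.foldl pvStepB d).getD "explanation" "" = pvExpVal lines (d.getD "explanation" "") := by
  induction lines with
  | nil => intro d; simp [pvExpVal]
  | cons x xs ih =>
    intro d
    rw [List.foldl_cons, ih, pvStepB_expl, pvExpVal_cons]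

-- (if (a || b) then x else y) splits into two ifs
theorem pvIf_or (a b : Bool) (x y : String) :
    (if (a || b) = true then x else y) = if a = true then x else if b = true then x else y := by
  cases a <;> simp

theorem pvSelect_eq (label : String) :
    pvNext pvKeywordCodes label =
      (if PySem.Str.isIn "statement" label then "s"
       else if PySem.Str.isIn "continuer" label then "b"
       else if PySem.Str.isIn "floor holder" label then "fh"
       else if PySem.Str.isIn "yes-no-question" label then "qy"
       else if PySem.Str.isIn "interrupted" label || PySem.Str.isIn "abandoned" label || PySem.Str.isIn "uninterpretable" label then "%"
       else if PySem.Str.isIn "floor grabber" label then "fg"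
       else if PySem.Str.isIn "wh-question" label || PySem.Str.isIn "wh question" label then "qw"
       else if PySem.Str.isIn "hold before answer" label || PySem.Str.isIn "agreement" label then "h"
       else if PySem.Str.isIn "or-clause" label || PySem.Str.isIn "or clause" label then "qrr"
       else if PySem.Str.isIn "rhetorical question" label then "qh"
       else if PySem.Str.isIn "or question" label then "qr"
       else if PySem.Str.isIn "open-ended question" label || PySem.Str.isIn "open ended question" label then "qo"
       else "") := by
  simp only [pvNext, pvKeywordCodes, pvIf_or]

-- ===== VERDICT (by name: the statement is the Claim_ definition above) =====
theorem parse_reply_py_spec : Claim_equal_parse_reply_py := by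
  intro reply _
  simp only [Spec_parse_reply_py, parse_reply_py, parse_reply_py_alt]
  rw [pvFoldB_label, pvFoldB_expl, PySem.Dict.getD_empty, PySem.Dict.getD_empty,
    pvFoldA_eq, pvSelect_eq]
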